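-- pv_equiv track=rewrite | github.com/ggg-ttt/MiniRAG | minirag/utils.py | is_continuous_subsequence
-- ===== SOURCE A (Python) =====
-- def is_continuous_subsequence(subseq, seq):
--     """
--     检查一个小元组(subseq)是否是另一个大元组(seq)中的连续子序列。
--     """
--     def find_all_indexes(tup, value):
--         # 查找元组中某个值的所有出现位置
--         indexes = []
--         start = 0
--         while True:
--             try:
--                 index = tup.index(value, start)
--                 indexes.append(index)
--                 start = index + 1
--             except ValueError:
--                 break
--         return indexes
--
--     # 查找子序列第一个元素在大元组中的所有位置
--     index_list = find_all_indexes(seq, subseq[0])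
--     for idx in index_list:
--         # 检查是否是连续的
--         if idx < len(seq) - 1 and seq[idx + 1] == subseq[-1]:
--             return True
--     return False
-- ===== SOURCE B (Python) =====
-- def is_continuous_subsequence(subseq, seq):
--     first, last = subseq[0], subseq[-1]
--     return any(a == first and b == last for a, b in zip(seq, seq[1:]))
-- ===== Notes on version B (the rewrite author's own statement) =====
-- stated objective: simpler
-- what changed: Replaces the two-pass structure (collect all indices of subseq[0] via repeated tuple.index, then scan that index list with bounds checks) by a single scan over adjacent pairs zip(seq, seq[1:]).
import Mathlib
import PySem

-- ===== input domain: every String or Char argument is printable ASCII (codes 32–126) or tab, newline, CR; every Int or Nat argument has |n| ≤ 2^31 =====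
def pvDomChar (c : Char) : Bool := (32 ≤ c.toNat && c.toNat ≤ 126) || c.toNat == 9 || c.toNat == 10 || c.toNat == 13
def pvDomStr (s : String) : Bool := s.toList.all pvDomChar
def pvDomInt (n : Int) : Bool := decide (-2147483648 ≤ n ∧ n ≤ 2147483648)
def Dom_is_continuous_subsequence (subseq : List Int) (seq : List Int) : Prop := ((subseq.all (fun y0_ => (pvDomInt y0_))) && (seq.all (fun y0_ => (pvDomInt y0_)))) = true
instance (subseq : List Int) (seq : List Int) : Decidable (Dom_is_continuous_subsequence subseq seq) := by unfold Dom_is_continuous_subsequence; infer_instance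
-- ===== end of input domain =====

-- B replaces A's two-pass structure (collect all positions of subseq[0], then scan them)
-- by a single scan over adjacent pairs of seq; objective: simpler. A raises IndexError on
-- empty subseq, hence Pre_ requires subseq ≠ [].


-- ===== PORT A =====
-- hand port of find_all_indexes: the repeated tup.index(value, start) loop collects the
-- positions of value in increasing order; exact on all inputs (the ValueError ends the loop).
def findAllIndexes : List Int → Int → Nat → List Nat
  | [], _, _ => []
  | x :: xs, v, i =>
      if x = v then i :: findAllIndexes xs v (i + 1) else findAllIndexes xs v (i + 1)

def is_continuous_subsequence (subseq : List Int) (seq : List Int) : Bool :=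
  let indexList := findAllIndexes seq (PySem.List.pyGetD subseq 0 0) 0
  indexList.any (fun idx =>
    decide (idx < seq.length - 1) &&
    decide (PySem.List.pyGetD seq ((idx : Int) + 1) 0 = PySem.List.pyGetD subseq (-1) 0))

-- ===== PORT B =====
def is_continuous_subsequence_alt (subseq : List Int) (seq : List Int) : Bool :=
  let first := PySem.List.pyGetD subseq 0 0
  let last := PySem.List.pyGetD subseq (-1) 0
  -- seq[1:] is seq.drop 1 (exact for a nonnegative start)
  (seq.zip (seq.drop 1)).any (fun p => p.1 == first && p.2 == last)

-- ===== PRECONDITION & SPEC =====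
-- Python A raises IndexError (subseq[0]) when subseq is empty; nothing else raises.
def Pre_is_continuous_subsequence (subseq : List Int) (seq : List Int) : Prop := subseq ≠ []
instance (subseq : List Int) (seq : List Int) : Decidable (Pre_is_continuous_subsequence subseq seq) := by unfold Pre_is_continuous_subsequence; infer_instance
def pvWitness_is_continuous_subsequence : List Int × List Int := ([1, 2], [0, 1, 2, 3])

def Spec_is_continuous_subsequence (subseq : List Int) (seq : List Int) (out : Bool) : Prop := out = is_continuous_subsequence_alt subseq seq
instance (subseq : List Int) (seq : List Int) (out : Bool) : Decidable (Spec_is_continuous_subsequence subseq seq out) := by unfold Spec_is_continuous_subsequence; infer_instance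

-- ===== CLAIM (what is proved, stated in full; the proofs are below) =====
def Claim_equal_is_continuous_subsequence : Prop := ∀ (subseq : List Int) (seq : List Int), Dom_is_continuous_subsequence subseq seq → Pre_is_continuous_subsequence subseq seq → Spec_is_continuous_subsequence subseq seq (is_continuous_subsequence subseq seq)

-- ===== LEMMAS AND PROOFS =====
lemma mem_findAllIndexes (xs : List Int) (v : Int) :
    ∀ (i idx : Nat), idx ∈ findAllIndexes xs v i ↔
      ∃ j, xs[j]? = some v ∧ idx = i + j := by
  induction xs with
  | nil => intro i idx; simp [findAllIndexes]
  | cons x xs ih =>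
    intro i idx
    by_cases hx : x = v
    · simp only [findAllIndexes, if_pos hx, List.mem_cons, ih]
      constructor
      · rintro (rfl | ⟨j, hv, rfl⟩)
        · exact ⟨0, by simp [hx], by omega⟩
        · exact ⟨j + 1, by simpa using hv, by omega⟩
      · rintro ⟨j, hv, rfl⟩
        cases j with
        | zero => left; omega
        | succ j => right; exact ⟨j, by simpa using hv, by omega⟩
    · simp only [findAllIndexes, if_neg hx, ih]
      constructor
      · rintro ⟨j, hv, rfl⟩
        exact ⟨j + 1, by simpa using hv, by omega⟩
      · rintro ⟨j, hv, rfl⟩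
        cases j with
        | zero => exact absurd (by simpa using hv) hx
        | succ j => exact ⟨j, by simpa using hv, by omega⟩

lemma zip_any_iff (seq : List Int) (f l : Int) :
    ((seq.zip (seq.drop 1)).any (fun p => p.1 == f && p.2 == l)) = true ↔
      ∃ k, seq[k]? = some f ∧ seq[k + 1]? = some l := by
  rw [List.any_eq_true]
  constructor
  · rintro ⟨⟨a, b⟩, hmem, hp⟩
    obtain ⟨k, hget⟩ := List.getElem?_of_mem hmem
    rw [List.getElem?_zip_eq_some] at hget
    obtain ⟨h1, h2⟩ := hget
    rw [List.getElem?_drop] at h2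
    simp only [Bool.and_eq_true, beq_iff_eq] at hp
    refine ⟨k, by rw [h1, hp.1], ?_⟩
    rw [show 1 + k = k + 1 from by omega] at h2
    rw [h2, hp.2]
  · rintro ⟨k, h1, h2⟩
    refine ⟨(f, l), ?_, by simp⟩
    apply List.mem_iff_getElem?.mpr
    refine ⟨k, ?_⟩
    rw [List.getElem?_zip_eq_some]
    refine ⟨h1, ?_⟩
    rw [List.getElem?_drop, show 1 + k = k + 1 from by omega]
    exact h2

lemma pyGetD_succ_of_some (seq : List Int) (j : Nat) (v : Int) (h : seq[j + 1]? = some v) :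
    PySem.List.pyGetD seq ((j : Int) + 1) 0 = v := by
  have hj : j + 1 < seq.length := (List.getElem?_eq_some_iff.mp h).1
  have := PySem.List.pyGetD_ofNat (xs := seq) (n := j + 1) (d := 0) hj
  rw [show ((j : Int) + 1) = ((j + 1 : Nat) : Int) from by push_cast; ring, this]
  have := List.getElem?_eq_some_iff.mp h
  obtain ⟨hh, he⟩ := this
  exact he

-- ===== VERDICT (by name: the statement is the Claim_ definition above) =====
theorem is_continuous_subsequence_spec : Claim_equal_is_continuous_subsequence := by
  intro subseq seq _ hpre
  unfold Spec_is_continuous_subsequence is_continuous_subsequence is_continuous_subsequence_alt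
  simp only []
  rw [Bool.eq_iff_iff, List.any_eq_true, zip_any_iff]
  constructor
  · rintro ⟨idx, hmem, hp⟩
    rw [mem_findAllIndexes] at hmem
    obtain ⟨j, hv, rfl⟩ := hmem
    simp only [Bool.and_eq_true, decide_eq_true_eq] at hp
    obtain ⟨hlt, heq⟩ := hp
    have hjlen : j < seq.length := (List.getElem?_eq_some_iff.mp hv).1
    have hj1 : j + 1 < seq.length := by omega
    refine ⟨j, hv, ?_⟩
    rw [List.getElem?_eq_some_iff]
    refine ⟨hj1, ?_⟩
    have h0 : (0 : Nat) + j = j := by omega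
    rw [h0] at heq
    rw [pyGetD_succ_of_some seq j _ (List.getElem?_eq_some_iff.mpr ⟨hj1, rfl⟩)] at heq
    exact heq
  · rintro ⟨k, h1, h2⟩
    have hk1 : k + 1 < seq.length := (List.getElem?_eq_some_iff.mp h2).1
    refine ⟨k, ?_, ?_⟩
    · rw [mem_findAllIndexes]
      exact ⟨k, h1, by omega⟩
    · simp only [Bool.and_eq_true, decide_eq_true_eq]
      exact ⟨by omega, pyGetD_succ_of_some seq k _ h2⟩
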